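-- pv_equiv track=rewrite | github.com/KorfLab/isoforms | gong/lib_gc/isohint.py | mgtag_sites
-- ===== SOURCE A (Python) =====
-- def mgtag_sites(seq, flank, minex, minin):
--     dons = []
--     accs = []
--
--     for i in range(flank + minex, len(seq) - flank - minex):
--         if seq[i:i+2] == 'GT':
--             dons.append(i)
--         if seq[i-1:i+1] == 'AG':
--             accs.append(i)
--
--     ndons = []
--     naccs = []
--
--     if dons and accs:
--         first_donor   = dons[0]
--         last_acceptor = accs[-1]
--
--         naccs = [acc for acc in accs if acc >= first_donor + minin - 1]
--         ndons = [don for don in dons if don <= last_acceptor - minin + 1]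
--
--     return ndons, naccs
-- ===== SOURCE B (Python) =====
-- def mgtag_sites(seq, flank, minex, minin):
--     lo = flank + minex
--     hi = len(seq) - flank - minex
--     dons = [i for i in range(lo, hi) if seq[i:i+2] == 'GT']
--     accs = [i for i in range(lo, hi) if seq[i-1:i+1] == 'AG']
--     if not dons or not accs:
--         return [], []
--     don_cut = accs[-1] - minin + 1   # dons is ascending: its valid part is a prefix
--     acc_cut = dons[0] + minin - 1    # accs is ascending: its valid part is a suffix
--     k = 0
--     while k < len(dons) and dons[k] <= don_cut:
--         k += 1
--     j = 0
--     while j < len(accs) and accs[j] < acc_cut: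
--         j += 1
--     return dons[:k], accs[j:]
-- ===== Notes on version B (the rewrite author's own statement) =====
-- stated objective: alternative
-- what changed: B replaces A's single accumulator fold plus two full filtering comprehensions with two independent comprehensions over the range and a threshold split: since both site lists are ascending, the distance filters reduce to a prefix cut on dons and a suffix cut on accs found by linear probes and taken with one slice each.
import Mathlib
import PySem

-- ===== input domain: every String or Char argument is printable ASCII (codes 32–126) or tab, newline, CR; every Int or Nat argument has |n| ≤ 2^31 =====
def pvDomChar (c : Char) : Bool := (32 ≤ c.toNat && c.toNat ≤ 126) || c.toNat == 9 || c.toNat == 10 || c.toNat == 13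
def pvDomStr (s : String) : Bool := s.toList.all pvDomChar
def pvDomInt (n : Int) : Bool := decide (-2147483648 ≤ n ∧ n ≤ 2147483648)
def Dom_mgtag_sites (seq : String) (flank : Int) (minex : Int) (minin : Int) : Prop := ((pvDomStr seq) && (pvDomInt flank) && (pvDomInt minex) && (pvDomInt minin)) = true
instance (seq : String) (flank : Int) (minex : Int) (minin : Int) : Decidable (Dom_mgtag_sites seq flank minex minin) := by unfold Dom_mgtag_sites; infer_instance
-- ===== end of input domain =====

-- B replaces A's accumulator fold + two filtering comprehensions by two independent
-- comprehensions and a prefix/suffix threshold split of the (ascending) site lists;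
-- same O(n) cost, proved equal on all inputs (A is total).

-- ===== PORT A =====
-- one loop appending to both lists, then two filtering comprehensions (literal transliteration)
def mgtag_sites (seq : String) (flank : Int) (minex : Int) (minin : Int) : List Int × List Int :=
  let cs := seq.toList
  let da := (PySem.List.pyRange (flank + minex) ((cs.length : Int) - flank - minex) 1).foldl
    (fun (st : List Int × List Int) i =>
      let st1 := if PySem.List.slice cs (some i) (some (i + 2)) = ['G', 'T'] then (st.1 ++ [i], st.2) else st
      if PySem.List.slice cs (some (i - 1)) (some (i + 1)) = ['A', 'G'] then (st1.1, st1.2 ++ [i]) else st1)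
    ([], [])
  let dons := da.1
  let accs := da.2
  if dons ≠ [] ∧ accs ≠ [] then
    let first_donor := PySem.List.pyGetD dons 0 0
    let last_acceptor := PySem.List.pyGetD accs (-1) 0
    (dons.filter (fun don => decide (don ≤ last_acceptor - minin + 1)),
     accs.filter (fun acc => decide (first_donor + minin - 1 ≤ acc)))
  else ([], [])

-- ===== PORT B =====
-- the Source B while loops: length of the longest prefix of xs whose elements satisfy p
def cutLen (p : Int → Bool) : List Int → Nat
  | [] => 0
  | x :: xs => if p x then cutLen p xs + 1 else 0

def mgtag_sites_alt (seq : String) (flank : Int) (minex : Int) (minin : Int) : List Int × List Int :=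
  let cs := seq.toList
  let lo := flank + minex
  let hi := (cs.length : Int) - flank - minex
  let dons := (PySem.List.pyRange lo hi 1).filter
    (fun i => decide (PySem.List.slice cs (some i) (some (i + 2)) = ['G', 'T']))
  let accs := (PySem.List.pyRange lo hi 1).filter
    (fun i => decide (PySem.List.slice cs (some (i - 1)) (some (i + 1)) = ['A', 'G']))
  if dons = [] ∨ accs = [] then ([], [])
  else
    let don_cut := PySem.List.pyGetD accs (-1) 0 - minin + 1
    let acc_cut := PySem.List.pyGetD dons 0 0 + minin - 1
    let k := cutLen (fun d => decide (d ≤ don_cut)) dons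
    let j := cutLen (fun a => decide (a < acc_cut)) accs
    (PySem.List.slice dons none (some (k : Int)), PySem.List.slice accs (some (j : Int)) none)

-- ===== PRECONDITION & SPEC =====
def Spec_mgtag_sites (seq : String) (flank : Int) (minex : Int) (minin : Int) (out : List Int × List Int) : Prop := out = mgtag_sites_alt seq flank minex minin
instance (seq : String) (flank : Int) (minex : Int) (minin : Int) (out : List Int × List Int) : Decidable (Spec_mgtag_sites seq flank minex minin out) := by unfold Spec_mgtag_sites; infer_instance

-- ===== CLAIM (what is proved, stated in full; the proofs are below) =====
def Claim_equal_mgtag_sites : Prop := ∀ (seq : String) (flank : Int) (minex : Int) (minin : Int), Dom_mgtag_sites seq flank minex minin → Spec_mgtag_sites seq flank minex minin (mgtag_sites seq flank minex minin)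

-- ===== LEMMAS AND PROOFS =====

-- A's loop builds exactly the two filtered lists of the range
theorem foldA_eq_filters (gt ag : Int → Prop) [DecidablePred gt] [DecidablePred ag]
    (l : List Int) (d a : List Int) :
    l.foldl (fun (st : List Int × List Int) i =>
        let st1 := if gt i then (st.1 ++ [i], st.2) else st
        if ag i then (st1.1, st1.2 ++ [i]) else st1) (d, a)
      = (d ++ l.filter (fun i => decide (gt i)), a ++ l.filter (fun i => decide (ag i))) := by
  induction l generalizing d a with
  | nil => simp
  | cons x xs ih =>
    by_cases hg : gt x <;> by_cases ha : ag x <;>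
      simp [List.foldl_cons, hg, ha, ih]

-- on a strictly ascending list, filtering by an upper threshold is taking the probed prefix
theorem filter_le_eq_take (c : Int) (l : List Int) (h : l.Pairwise (· < ·)) :
    l.filter (fun x => decide (x ≤ c)) = l.take (cutLen (fun x => decide (x ≤ c)) l) := by
  induction l with
  | nil => rfl
  | cons x xs ih =>
    rcases List.pairwise_cons.mp h with ⟨hx, hxs⟩
    by_cases hc : x ≤ c
    · simp [cutLen, hc, ih hxs]
    · simp only [List.filter_cons, cutLen, hc, decide_false, List.take_zero, if_false,
        Bool.false_eq_true]
      exact List.filter_eq_nil_iff.mpr (fun y hy => by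
        have := hx y hy
        simpa using (by omega : ¬ y ≤ c))

-- on a strictly ascending list, filtering by a lower threshold is dropping the probed prefix
theorem filter_ge_eq_drop (c : Int) (l : List Int) (h : l.Pairwise (· < ·)) :
    l.filter (fun x => decide (c ≤ x)) = l.drop (cutLen (fun x => decide (x < c)) l) := by
  induction l with
  | nil => rfl
  | cons x xs ih =>
    rcases List.pairwise_cons.mp h with ⟨hx, hxs⟩
    by_cases hc : x < c
    · have : ¬ c ≤ x := by omega
      simp [cutLen, hc, this, ih hxs]
    · have hcx : c ≤ x := by omega
      simp only [cutLen, hc, decide_false, if_false, Bool.false_eq_true, List.drop_zero]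
      rw [List.filter_cons]
      simp only [hcx, decide_true, if_true]
      congr 1
      exact List.filter_eq_self.mpr (fun y hy => by
        have := hx y hy
        simpa using (by omega : c ≤ y))

-- ===== VERDICT (by name: the statement is the Claim_ definition above) =====
theorem mgtag_sites_spec : Claim_equal_mgtag_sites := by
  intro seq flank minex minin _
  unfold Spec_mgtag_sites mgtag_sites mgtag_sites_alt
  simp only [foldA_eq_filters, List.nil_append]
  set cs := seq.toList with hcs
  set r := PySem.List.pyRange (flank + minex) ((cs.length : Int) - flank - minex) 1 with hr
  set dons := r.filter (fun i => decide (PySem.List.slice cs (some i) (some (i + 2)) = ['G', 'T'])) with hd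
  set accs := r.filter (fun i => decide (PySem.List.slice cs (some (i - 1)) (some (i + 1)) = ['A', 'G'])) with ha
  have hdp : dons.Pairwise (· < ·) := (PySem.List.pairwise_lt_pyRange_one _ _).filter _
  have hap : accs.Pairwise (· < ·) := (PySem.List.pairwise_lt_pyRange_one _ _).filter _
  by_cases hde : dons = []
  · simp [hde]
  · by_cases hae : accs = []
    · simp [hae]
    · simp only [hde, hae, ne_eq, not_false_eq_true, and_self, if_true, or_self, if_false]
      simp only [Prod.mk.injEq]
      constructor
      · rw [filter_le_eq_take _ _ hdp, PySem.List.slice_to_natCast]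
      · rw [filter_ge_eq_drop _ _ hap, PySem.List.slice_from_natCast]
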